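-- pv_equiv track=rewrite | github.com/Murazakl/main | I33/tp1/ex10.py | recherche2
-- ===== SOURCE A (Python) =====
-- def recherche2(L,S,p):
--     T = []
--     k = 0
--     som = L[0]
--     i = 1
--     while i <= p:
--         som += L[i]
--         i += 1
--     if som >= S:
--         T += [0]
--     k = 1
--     while k < len(L) - p:
--         som += L[p+k] - L[k-1]
--         if som >= S:
--             T += [k]
--         k += 1
--     return T
-- ===== SOURCE B (Python) =====
-- def recherche2(L, S, p):
--     n = len(L)
--     if p < 0 or p >= n:
--         raise IndexError("window size out of range")
--     P = [0]
--     for x in L: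
--         P.append(P[-1] + x)
--     return [k for k in range(n - p) if P[k + p + 1] - P[k] >= S]
-- ===== Notes on version B (the rewrite author's own statement) =====
-- stated objective: alternative
-- what changed: Replaces A's single maintained sliding running sum (explicit while loops with per-iteration index bookkeeping) with a precomputed prefix-sum table P and one list-comprehension filtering pass testing P[k+p+1]-P[k] >= S.
-- outside the precondition, e.g. on recherche2([5], 3, -1): A returns [0, 1], B raises IndexError
import Mathlib
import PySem

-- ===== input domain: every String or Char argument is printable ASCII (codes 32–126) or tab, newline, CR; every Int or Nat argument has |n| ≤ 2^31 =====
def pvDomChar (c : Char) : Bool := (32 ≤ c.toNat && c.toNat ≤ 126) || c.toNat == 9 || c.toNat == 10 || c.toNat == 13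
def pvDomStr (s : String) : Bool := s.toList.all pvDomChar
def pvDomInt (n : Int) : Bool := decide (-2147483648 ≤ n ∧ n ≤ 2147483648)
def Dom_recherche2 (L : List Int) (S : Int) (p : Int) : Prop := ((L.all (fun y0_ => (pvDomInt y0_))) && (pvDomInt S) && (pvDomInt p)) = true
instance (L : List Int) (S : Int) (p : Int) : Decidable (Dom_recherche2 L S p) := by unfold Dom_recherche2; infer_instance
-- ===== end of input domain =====

-- B replaces A's maintained sliding running sum with a precomputed prefix-sum table
-- and a separate filtering pass over window starts (alternative decomposition, same cost).


-- ===== PORT A =====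
def recherche2 (L : List Int) (S : Int) (p : Int) : List Int :=
  let som0 : Int := PySem.List.pyGetD L 0 0
  let som1 : Int := (PySem.List.pyRange 1 (p + 1) 1).foldl
    (fun s i => s + PySem.List.pyGetD L i 0) som0
  let T0 : List Int := if S ≤ som1 then [0] else []
  let r := (PySem.List.pyRange 1 ((L.length : Int) - p) 1).foldl
    (fun (st : List Int × Int) k =>
      let som := st.2 + PySem.List.pyGetD L (p + k) 0 - PySem.List.pyGetD L (k - 1) 0
      (if S ≤ som then st.1 ++ [k] else st.1, som))
    (T0, som1)
  r.1

-- ===== PORT B =====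
def recherche2_alt (L : List Int) (S : Int) (p : Int) : List Int :=
  if p < 0 ∨ (L.length : Int) ≤ p then []   -- Source B raises IndexError here (outside Pre_)
  else
    let P : List Int := L.foldl (fun P x => P ++ [PySem.List.pyGetD P (-1) 0 + x]) [0]
    (PySem.List.pyRange 0 ((L.length : Int) - p) 1).filter
      (fun k => S ≤ PySem.List.pyGetD P (k + p + 1) 0 - PySem.List.pyGetD P k 0)

-- ===== PRECONDITION & SPEC =====
-- Pre_ excludes p = -1, on which A's negative-index wraparound L[p+k] accidentally makes it
-- return a value while B's natural guard raises IndexError, and all inputs where A itself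
-- raises IndexError (empty L, p >= len(L), p <= -2).
def Pre_recherche2 (L : List Int) (S : Int) (p : Int) : Prop :=
  0 ≤ p ∧ p < (L.length : Int)
instance (L : List Int) (S : Int) (p : Int) : Decidable (Pre_recherche2 L S p) := by
  unfold Pre_recherche2; infer_instance
def pvWitness_recherche2 : List Int × Int × Int := ([1, 2, 3, 4], 5, 1)
def Spec_recherche2 (L : List Int) (S : Int) (p : Int) (out : List Int) : Prop := out = recherche2_alt L S p
instance (L : List Int) (S : Int) (p : Int) (out : List Int) : Decidable (Spec_recherche2 L S p out) := by unfold Spec_recherche2; infer_instance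

-- ===== CLAIM (what is proved, stated in full; the proofs are below) =====
def Claim_equal_recherche2 : Prop := ∀ (L : List Int) (S : Int) (p : Int), Dom_recherche2 L S p → Pre_recherche2 L S p → Spec_recherche2 L S p (recherche2 L S p)

-- ===== LEMMAS AND PROOFS =====

-- the values B's table-building loop appends: prefix sums of L starting from running value s
def pvPref (L : List Int) (s : Int) : List Int :=
  match L with
  | [] => []
  | x :: xs => (s + x) :: pvPref xs (s + x)

theorem pvPref_foldl (L : List Int) (acc : List Int) (s : Int) :
    L.foldl (fun P x => P ++ [PySem.List.pyGetD P (-1) 0 + x]) (acc ++ [s])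
      = (acc ++ [s]) ++ pvPref L s := by
  induction L generalizing acc s with
  | nil => simp [pvPref]
  | cons x xs ih =>
    simp only [List.foldl_cons, PySem.List.pyGetD_neg_one_append_singleton]
    have := ih (acc ++ [s]) (s + x)
    simpa [pvPref, List.append_assoc] using this

theorem pvPref_getD (L : List Int) (s : Int) (i : Nat) (hi : i < L.length) :
    (pvPref L s).getD i 0 = s + (L.take (i + 1)).sum := by
  induction L generalizing s i with
  | nil => simp at hi
  | cons x xs ih =>
    cases i with
    | zero => simp [pvPref]
    | succ j =>
      have hj : j < xs.length := by simpa using hi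
      show ((s + x) :: pvPref xs (s + x)).getD (j + 1) 0 = _
      rw [List.getD_cons_succ, ih (s + x) j hj]
      simp [add_assoc]

-- B's table indexed at a nonnegative in-range position is a prefix sum of L
theorem pvTable_getD (L : List Int) (i : Int) (h0 : 0 ≤ i) (hn : i ≤ (L.length : Int)) :
    PySem.List.pyGetD (L.foldl (fun P x => P ++ [PySem.List.pyGetD P (-1) 0 + x]) [0]) i 0
      = (L.take i.toNat).sum := by
  obtain ⟨n, rfl⟩ : ∃ n : Nat, i = (n : Int) := ⟨i.toNat, by omega⟩
  have hfold := pvPref_foldl L [] 0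
  simp only [List.nil_append] at hfold
  rw [hfold, List.singleton_append, PySem.List.pyGetD_natCast]
  rcases Nat.eq_zero_or_pos n with h | h
  · simp [h]
  · obtain ⟨j, hj⟩ : ∃ j : Nat, n = j + 1 := ⟨n - 1, by omega⟩
    subst hj
    rw [List.getD_cons_succ, pvPref_getD L 0 j (by simp at hn; omega)]
    simp

-- the window predicate both ports reduce to
def pvCond (L : List Int) (S : Int) (p : Int) (k : Int) : Bool :=
  decide (S ≤ (L.take (k + p + 1).toNat).sum - (L.take k.toNat).sum)

-- A's first phase computes the sum of the first m elements
theorem pvSum1 (L : List Int) (m : Nat) (h1 : 1 ≤ m) (hm : m ≤ L.length) :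
    (PySem.List.pyRange 1 (m : Int) 1).foldl
      (fun s i => s + PySem.List.pyGetD L i 0) (PySem.List.pyGetD L 0 0)
      = (L.take m).sum := by
  induction m with
  | zero => omega
  | succ m ih =>
    rcases Nat.eq_zero_or_pos m with h | h
    · subst h
      rw [PySem.List.pyRange_one_eq_nil (by norm_num), List.foldl_nil]
      rcases L with _ | ⟨x, xs⟩
      · simp at hm
      · simp [PySem.List.pyGetD_zero_cons]
    · rw [show ((m + 1 : Nat) : Int) = (m : Int) + 1 by push_cast; ring,
        PySem.List.pyRange_one_succ_right (by exact_mod_cast h),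
        List.foldl_append, ih h (by omega), List.foldl_cons, List.foldl_nil]
      rw [PySem.List.pyGetD_eq_getElem L 0 (by positivity) (by exact_mod_cast hm)]
      simp only [Int.toNat_natCast]
      exact (List.sum_take_succ L m (by omega)).symm

-- invariant of A's main loop: after the iterations k = 1 .. m-1 the accumulated list is
-- the filtered window starts below m and som is the current window sum
theorem pvLoopInv (L : List Int) (S : Int) (p : Int) (hp : 0 ≤ p)
    (m : Nat) (h1 : 1 ≤ m) (hm : m + p.toNat ≤ L.length) :
    (PySem.List.pyRange 1 (m : Int) 1).foldl
      (fun (st : List Int × Int) k =>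
        (if S ≤ st.2 + PySem.List.pyGetD L (p + k) 0 - PySem.List.pyGetD L (k - 1) 0
          then st.1 ++ [k] else st.1,
         st.2 + PySem.List.pyGetD L (p + k) 0 - PySem.List.pyGetD L (k - 1) 0))
      ((if S ≤ (L.take (p.toNat + 1)).sum then [0] else []), (L.take (p.toNat + 1)).sum)
      = ((PySem.List.pyRange 0 (m : Int) 1).filter (pvCond L S p),
         (L.take (m + p.toNat)).sum - (L.take (m - 1)).sum) := by
  induction m with
  | zero => omega
  | succ m ih =>
    rcases Nat.eq_zero_or_pos m with h | h
    · subst h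
      rw [PySem.List.pyRange_one_eq_nil (by norm_num), List.foldl_nil]
      have hr : PySem.List.pyRange 0 ((0 + 1 : Nat) : Int) 1 = [0] := by
        simpa using PySem.List.pyRange_one_singleton (0 : Int)
      rw [hr]
      have hc : pvCond L S p 0 = decide (S ≤ (L.take (p.toNat + 1)).sum) := by
        unfold pvCond
        rw [show ((0 : Int) + p + 1).toNat = p.toNat + 1 by omega]
        simp
      rw [List.filter_singleton, hc]
      by_cases hs : S ≤ (L.take (p.toNat + 1)).sum
      · simp [hs, Nat.add_comm]
      · simp [hs, Nat.add_comm]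
    · rw [show ((m + 1 : Nat) : Int) = (m : Int) + 1 by push_cast; ring,
        PySem.List.pyRange_one_succ_right (by exact_mod_cast h),
        List.foldl_append, ih h (by omega), List.foldl_cons, List.foldl_nil]
      have hgp : PySem.List.pyGetD L (p + (m : Int)) 0 = L[m + p.toNat]'(by omega) := by
        rw [PySem.List.pyGetD_eq_getElem L 0 (by omega) (by omega)]
        congr 1; omega
      have hgm : PySem.List.pyGetD L ((m : Int) - 1) 0 = L[m - 1]'(by omega) := by
        rw [PySem.List.pyGetD_eq_getElem L 0 (by omega) (by omega)]
        congr 1; omega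
      have hsom : (L.take (m + p.toNat)).sum - (L.take (m - 1)).sum
            + PySem.List.pyGetD L (p + (m : Int)) 0 - PySem.List.pyGetD L ((m : Int) - 1) 0
          = (L.take (m + 1 + p.toNat)).sum - (L.take (m + 1 - 1)).sum := by
        rw [hgp, hgm]
        have e1 : (L.take (m + p.toNat + 1)).sum
            = (L.take (m + p.toNat)).sum + L[m + p.toNat]'(by omega) :=
          List.sum_take_succ L (m + p.toNat) (by omega)
        have e2 : (L.take ((m - 1) + 1)).sum
            = (L.take (m - 1)).sum + L[m - 1]'(by omega) :=
          List.sum_take_succ L (m - 1) (by omega)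
        rw [show m - 1 + 1 = m by omega] at e2
        rw [show m + 1 + p.toNat = m + p.toNat + 1 by omega, e1]
        simp only [Nat.add_sub_cancel]
        rw [e2]; ring
      have hcond : (S ≤ (L.take (m + p.toNat)).sum - (L.take (m - 1)).sum
            + PySem.List.pyGetD L (p + (m : Int)) 0 - PySem.List.pyGetD L ((m : Int) - 1) 0)
          ↔ pvCond L S p (m : Int) = true := by
        rw [hsom]
        unfold pvCond
        rw [show ((m : Int) + p + 1).toNat = m + 1 + p.toNat by omega,
          show ((m : Int)).toNat = m by omega]
        simp
      have hfil : (PySem.List.pyRange 0 ((m : Int) + 1) 1).filter (pvCond L S p)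
          = (PySem.List.pyRange 0 (m : Int) 1).filter (pvCond L S p)
            ++ (if pvCond L S p (m : Int) then [(m : Int)] else []) := by
        rw [PySem.List.pyRange_one_succ_right (by positivity), List.filter_append,
          List.filter_singleton]
        simp [Bool.cond_eq_ite]
      rw [hfil]
      by_cases hc : pvCond L S p (m : Int) = true
      · rw [if_pos (hcond.mpr hc), if_pos hc]
        exact Prod.ext rfl hsom
      · rw [if_neg (fun hx => hc (hcond.mp hx)), if_neg hc]
        exact Prod.ext (by simp) hsom

-- ===== VERDICT (by name: the statement is the Claim_ definition above) =====
theorem recherche2_spec : Claim_equal_recherche2 := by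
  intro L S p _ hpre
  obtain ⟨hp, hpn⟩ := hpre
  simp only [Spec_recherche2, recherche2, recherche2_alt]
  rw [if_neg (by omega : ¬ (p < 0 ∨ (L.length : Int) ≤ p))]
  have hB : ∀ k ∈ PySem.List.pyRange 0 ((L.length : Int) - p) 1,
      (decide (S ≤ PySem.List.pyGetD
          (L.foldl (fun P x => P ++ [PySem.List.pyGetD P (-1) 0 + x]) [0]) (k + p + 1) 0
        - PySem.List.pyGetD
          (L.foldl (fun P x => P ++ [PySem.List.pyGetD P (-1) 0 + x]) [0]) k 0))
      = pvCond L S p k := by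
    intro k hk
    rw [PySem.List.mem_pyRange_one] at hk
    rw [pvTable_getD L (k + p + 1) (by omega) (by omega),
      pvTable_getD L k (by omega) (by omega)]
    rfl
  rw [List.filter_congr hB]
  have hphase1 : (PySem.List.pyRange 1 (p + 1) 1).foldl
      (fun s i => s + PySem.List.pyGetD L i 0) (PySem.List.pyGetD L 0 0)
      = (L.take (p.toNat + 1)).sum := by
    rw [show (p + 1 : Int) = ((p.toNat + 1 : Nat) : Int) by omega]
    exact pvSum1 L (p.toNat + 1) (by omega) (by omega)
  rw [hphase1]
  rw [show ((L.length : Int) - p) = ((L.length - p.toNat : Nat) : Int) by omega,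
    pvLoopInv L S p hp (L.length - p.toNat) (by omega) (by omega)]
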